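-- pv_equiv track=rewrite | github.com/invicta117/singlespottedtable | table-one-spot.py | count_spots
-- ===== SOURCE A (Python) =====
-- size = 5
--
-- def count_spots(table):
--     spots = 0
--     for i in range(len(table)):
--         if table[i] == "B":
--             if (i >= size and table[i - size] == "R") or ( i % size != 0 and table[i - 1] == "R"):
--                 spots +=1
--                 if spots > 1: return False
--     if spots == 1: return True
--     return False
-- ===== SOURCE B (Python) =====
-- size = 5
--
-- def count_spots(table):
--     n = len(table)
--     touched = set()
--     for j in range(n):
--         if table[j] == "R":
--             d = j + size
--             if d < n and table[d] == "B":
--                 touched.add(d)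
--             r = j + 1
--             if j % size != size - 1 and r < n and table[r] == "B":
--                 touched.add(r)
--     return len(touched) == 1
-- ===== Notes on version B (the rewrite author's own statement) =====
-- stated objective: alternative
-- what changed: B inverts the scan: instead of A's B-centric counter with early return that checks each "B" cell's up/left neighbours, B iterates over "R" cells, collects into a set the indices of "B" cells reached down (j+size) or right (j+1, gated on the column edge), and returns len(set)==1; the set dedupes a B touched by two R's just as A counts it once.
import Mathlib
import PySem

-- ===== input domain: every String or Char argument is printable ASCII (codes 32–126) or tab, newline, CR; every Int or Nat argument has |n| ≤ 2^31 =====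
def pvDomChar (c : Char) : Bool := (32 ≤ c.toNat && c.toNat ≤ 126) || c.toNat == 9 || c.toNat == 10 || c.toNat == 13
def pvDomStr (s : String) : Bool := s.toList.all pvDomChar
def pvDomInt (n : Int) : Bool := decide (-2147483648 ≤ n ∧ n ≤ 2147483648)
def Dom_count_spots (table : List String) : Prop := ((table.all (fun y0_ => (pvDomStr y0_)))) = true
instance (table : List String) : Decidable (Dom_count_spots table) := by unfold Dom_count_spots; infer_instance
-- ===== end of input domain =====

-- B re-implements the check R-centrically: it collects into a set the indices of "B" cells reached
-- down/right from each "R" and tests len == 1 (objective: alternative decomposition; same cost).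


-- ===== PORT A =====
-- literal port of A's index loop with early return; table[i-5]/table[i-1] are in range under
-- the guards (i ≥ 5, i % 5 ≠ 0), so List.getD is exact there.
def count_spots_go (table : List String) (i spots : Nat) : Bool :=
  if _h : i < table.length then
    if table.getD i "" == "B" then
      if (decide (5 ≤ i) && (table.getD (i - 5) "" == "R")) ||
         (decide (i % 5 ≠ 0) && (table.getD (i - 1) "" == "R")) then
        if spots + 1 > 1 then false
        else count_spots_go table (i + 1) (spots + 1)
      else count_spots_go table (i + 1) spots
    else count_spots_go table (i + 1) spots
  else spots == 1
termination_by table.length - i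

def count_spots (table : List String) : Bool :=
  count_spots_go table 0 0

-- ===== PORT B =====
def count_spots_step (table : List String) (n : Nat) (s : PySem.Set Nat) (j : Nat) : PySem.Set Nat :=
  if table.getD j "" == "R" then
    let s1 := if j + 5 < n ∧ table.getD (j + 5) "" == "B" then PySem.Set.add s (j + 5) else s
    if j % 5 ≠ 4 ∧ j + 1 < n ∧ table.getD (j + 1) "" == "B" then PySem.Set.add s1 (j + 1) else s1
  else s

def count_spots_alt (table : List String) : Bool :=
  let n := table.length
  let touched := (List.range n).foldl (count_spots_step table n) PySem.Set.empty
  PySem.Set.len touched == 1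

-- ===== PRECONDITION & SPEC =====
def Spec_count_spots (table : List String) (out : Bool) : Prop := out = count_spots_alt table
instance (table : List String) (out : Bool) : Decidable (Spec_count_spots table out) := by unfold Spec_count_spots; infer_instance

-- ===== CLAIM (what is proved, stated in full; the proofs are below) =====
def Claim_equal_count_spots : Prop := ∀ (table : List String), Dom_count_spots table → Spec_count_spots table (count_spots table)

-- ===== LEMMAS AND PROOFS =====

-- a cell index qualifies: it holds "B" and has an "R" above or (same row) to its left
def pvQual (table : List String) (i : Nat) : Bool :=
  (table.getD i "" == "B") &&
  ((decide (5 ≤ i) && (table.getD (i - 5) "" == "R")) ||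
   (decide (i % 5 ≠ 0) && (table.getD (i - 1) "" == "R")))

theorem count_spots_go_eq (table : List String) (i spots : Nat) :
    count_spots_go table i spots =
      decide (spots + (List.range' i (table.length - i)).countP (pvQual table) = 1) := by
  by_cases h : i < table.length
  · have hk : table.length - i = (table.length - (i + 1)) + 1 := by omega
    rw [hk, List.range'_succ, List.countP_cons]
    rw [count_spots_go]
    simp only [h, dif_pos]
    have ihs : ∀ sp, count_spots_go table (i + 1) sp =
        decide (sp + (List.range' (i + 1) (table.length - (i + 1))).countP (pvQual table) = 1) :=
      fun sp => count_spots_go_eq table (i + 1) sp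
    by_cases hB : (table.getD i "" == "B") = true
    · by_cases hC : ((decide (5 ≤ i) && (table.getD (i - 5) "" == "R")) ||
         (decide (i % 5 ≠ 0) && (table.getD (i - 1) "" == "R"))) = true
      · have hq : pvQual table i = true := by unfold pvQual; rw [hB, hC]; rfl
        rw [hB, if_pos rfl, hC, if_pos rfl, hq]
        by_cases hs : spots + 1 > 1
        · rw [if_pos hs, Bool.eq_iff_iff]
          simp only [decide_eq_true_eq, if_true, Bool.false_eq_true, false_iff]
          omega
        · rw [if_neg hs, ihs, Bool.eq_iff_iff]
          simp only [decide_eq_true_eq, if_true]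
          omega
      · have hq : pvQual table i = false := by
          unfold pvQual
          rw [Bool.not_eq_true] at hC
          rw [hC, Bool.and_false]
        rw [hB, if_pos rfl]
        rw [Bool.not_eq_true] at hC
        rw [hC]
        simp only [Bool.false_eq_true, if_false]
        rw [ihs, hq]
        simp
    · have hq : pvQual table i = false := by
        unfold pvQual
        rw [Bool.not_eq_true] at hB
        rw [hB, Bool.false_and]
      rw [Bool.not_eq_true] at hB
      rw [hB]
      simp only [Bool.false_eq_true, if_false]
      rw [ihs, hq]
      simp
  · rw [count_spots_go]
    simp only [h, dif_neg, not_false_iff]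
    have h0 : table.length - i = 0 := by omega
    rw [h0, Bool.eq_iff_iff]
    simp
termination_by table.length - i

-- what a single j of B's scan contributes
def pvAddedBy (table : List String) (n j x : Nat) : Prop :=
  (table.getD j "" == "R") = true ∧
  ((x = j + 5 ∧ j + 5 < n ∧ (table.getD (j + 5) "" == "B") = true) ∨
   (x = j + 1 ∧ j % 5 ≠ 4 ∧ j + 1 < n ∧ (table.getD (j + 1) "" == "B") = true))

theorem mem_step (table : List String) (n j : Nat) (s : PySem.Set Nat) (x : Nat) :
    x ∈ count_spots_step table n s j ↔ x ∈ s ∨ pvAddedBy table n j x := by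
  unfold count_spots_step pvAddedBy
  by_cases hR : (table.getD j "" == "R") = true
  · rw [if_pos hR]
    split_ifs with h1 h5 h5 <;>
      simp only [PySem.Set.mem_add, hR, true_and] <;> tauto
  · rw [if_neg hR]
    tauto

theorem mem_fold_step (table : List String) (n : Nat) (l : List Nat) (s : PySem.Set Nat) (x : Nat) :
    x ∈ l.foldl (count_spots_step table n) s ↔ x ∈ s ∨ ∃ j ∈ l, pvAddedBy table n j x := by
  induction l generalizing s with
  | nil => simp
  | cons j l ih =>
    rw [List.foldl_cons, ih, mem_step]
    simp only [List.mem_cons]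
    constructor
    · rintro (⟨hs | ha⟩ | ⟨j', hj', ha⟩)
      · exact Or.inl hs
      · exact Or.inr ⟨j, Or.inl rfl, ha⟩
      · exact Or.inr ⟨j', Or.inr hj', ha⟩
    · rintro (hs | ⟨j', hj' | hj', ha⟩)
      · exact Or.inl (Or.inl hs)
      · exact Or.inl (Or.inr (hj' ▸ ha))
      · exact Or.inr ⟨j', hj', ha⟩

theorem nodup_fold_step (table : List String) (n : Nat) (l : List Nat) (s : PySem.Set Nat)
    (hs : s.Nodup) : (l.foldl (count_spots_step table n) s).Nodup := by
  induction l generalizing s with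
  | nil => exact hs
  | cons j l ih =>
    rw [List.foldl_cons]
    apply ih
    unfold count_spots_step
    split_ifs
    all_goals repeat apply PySem.Set.nodup_add
    all_goals exact hs

theorem addedBy_iff_qual (table : List String) (x : Nat) :
    (∃ j ∈ List.range table.length, pvAddedBy table table.length j x) ↔
      (x < table.length ∧ pvQual table x = true) := by
  constructor
  · rintro ⟨j, hj, hR, hcase⟩
    rw [List.mem_range] at hj
    rcases hcase with ⟨hx, hlt, hB⟩ | ⟨hx, hmod, hlt, hB⟩
    · subst hx
      refine ⟨hlt, ?_⟩
      unfold pvQual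
      have h5 : (decide (5 ≤ j + 5)) = true := by simp
      have he : j + 5 - 5 = j := by omega
      rw [hB, he, hR, h5, Bool.true_and, Bool.true_and, Bool.true_or]
    · subst hx
      refine ⟨hlt, ?_⟩
      unfold pvQual
      have hm : (decide ((j + 1) % 5 ≠ 0)) = true := by simp; omega
      have he : j + 1 - 1 = j := by omega
      rw [hB, he, hR, hm, Bool.true_and, Bool.true_and, Bool.or_true]
  · rintro ⟨hx, hq⟩
    unfold pvQual at hq
    obtain ⟨hB, hC⟩ := Bool.and_eq_true_iff.mp hq
    rcases Bool.or_eq_true_iff.mp hC with h | h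
    · obtain ⟨h5, hR⟩ := Bool.and_eq_true_iff.mp h
      have h5' : 5 ≤ x := of_decide_eq_true h5
      refine ⟨x - 5, List.mem_range.mpr (by omega), hR, Or.inl ⟨by omega, by omega, ?_⟩⟩
      have he : x - 5 + 5 = x := by omega
      rw [he]; exact hB
    · obtain ⟨hm, hR⟩ := Bool.and_eq_true_iff.mp h
      have hm' : x % 5 ≠ 0 := of_decide_eq_true hm
      have hx1 : 1 ≤ x := by omega
      refine ⟨x - 1, List.mem_range.mpr (by omega), hR, Or.inr ⟨by omega, by omega, by omega, ?_⟩⟩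
      have he : x - 1 + 1 = x := by omega
      rw [he]; exact hB

theorem len_touched (table : List String) :
    ((List.range table.length).foldl (count_spots_step table table.length) PySem.Set.empty).length
      = (List.range' 0 table.length).countP (pvQual table) := by
  set t := (List.range table.length).foldl (count_spots_step table table.length) PySem.Set.empty
    with ht
  have hnd : t.Nodup := nodup_fold_step _ _ _ _ List.nodup_nil
  have hmem : ∀ x, x ∈ t ↔ x ∈ (List.range table.length).filter (pvQual table) := by
    intro x
    rw [ht, mem_fold_step]
    simp only [PySem.Set.empty, List.not_mem_nil, false_or]
    rw [addedBy_iff_qual]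
    simp [List.mem_filter, List.mem_range, and_comm]
  have hperm : t.Perm ((List.range table.length).filter (pvQual table)) :=
    (List.perm_ext_iff_of_nodup hnd (List.Nodup.filter _ List.nodup_range)).mpr hmem
  rw [hperm.length_eq, ← List.countP_eq_length_filter, List.range_eq_range']

-- ===== VERDICT (by name: the statement is the Claim_ definition above) =====
theorem count_spots_spec : Claim_equal_count_spots := by
  intro table _
  unfold Spec_count_spots count_spots count_spots_alt
  rw [count_spots_go_eq]
  simp only [Nat.sub_zero]
  rw [PySem.Set.len, len_touched, Bool.eq_iff_iff]
  simp
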